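-- pv_equiv track=rewrite | github.com/Corey-Zumar/clipper-1 | model_composition/image_driver_1/single_process/driver.py | condense_delays
-- ===== SOURCE A (Python) =====
-- def condense_delays(arrival_process, replica_num):
--     condensed_process = []
--     idx = 0
--     curr_delay = 0
--     while idx < len(arrival_process):
--         request_delay_millis, request_replica_num = arrival_process[idx]
--         if request_replica_num == replica_num:
--             condensed_process.append((curr_delay + request_delay_millis, replica_num))
--             curr_delay = 0
--         else:
--             curr_delay += request_delay_millis
--
--         idx += 1
--
--     return condensed_process
-- ===== SOURCE B (Python) =====
-- def condense_delays(arrival_process, replica_num):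
--     condensed_process = []
--     rest = arrival_process
--     while True:
--         idx = next((i for i, (_, r) in enumerate(rest) if r == replica_num), None)
--         if idx is None:
--             return condensed_process
--         condensed_process.append(
--             (sum(d for d, _ in rest[:idx + 1]), replica_num))
--         rest = rest[idx + 1:]
-- ===== Notes on version B (the rewrite author's own statement) =====
-- stated objective: alternative
-- what changed: B replaces A's element-by-element pass with a conditional running accumulator by a chunk-splitting strategy: repeatedly locate the next request of the wanted replica, emit the sum of the whole slice up to and including it, and continue on the remaining suffix.
import Mathlib
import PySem

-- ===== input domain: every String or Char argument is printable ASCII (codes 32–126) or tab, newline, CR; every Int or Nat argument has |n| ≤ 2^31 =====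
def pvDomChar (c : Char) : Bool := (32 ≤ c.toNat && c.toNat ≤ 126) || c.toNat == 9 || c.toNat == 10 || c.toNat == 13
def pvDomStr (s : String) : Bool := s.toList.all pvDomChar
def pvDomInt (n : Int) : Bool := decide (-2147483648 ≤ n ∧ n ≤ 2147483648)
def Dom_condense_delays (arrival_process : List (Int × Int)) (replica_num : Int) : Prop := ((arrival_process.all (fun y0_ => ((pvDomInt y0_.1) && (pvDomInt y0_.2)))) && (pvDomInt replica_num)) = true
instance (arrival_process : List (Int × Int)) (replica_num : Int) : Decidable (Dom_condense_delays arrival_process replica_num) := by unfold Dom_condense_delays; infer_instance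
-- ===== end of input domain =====

-- B condenses by chunk-splitting (find next matching request, sum the slice, recurse on the suffix)
-- instead of A's element-wise pass with a conditional running accumulator (objective: alternative).

-- ===== PORT A =====
-- while idx < len: walk one element at a time, scalar curr_delay, append on match
def condense_delays_go (xs : List (Int × Int)) (replica_num : Int) (curr_delay : Int)
    (condensed_process : List (Int × Int)) : List (Int × Int) :=
  match xs with
  | [] => condensed_process
  | (request_delay_millis, request_replica_num) :: rest =>
    if request_replica_num == replica_num then
      condense_delays_go rest replica_num 0
        (condensed_process ++ [(curr_delay + request_delay_millis, replica_num)])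
    else
      condense_delays_go rest replica_num (curr_delay + request_delay_millis) condensed_process

def condense_delays (arrival_process : List (Int × Int)) (replica_num : Int) : List (Int × Int) :=
  condense_delays_go arrival_process replica_num 0 []

-- ===== PORT B =====
-- while True: idx = next matching index in rest (None -> return); emit sum of rest[:idx+1]; rest = rest[idx+1:]
def condense_delays_alt_go (rest : List (Int × Int)) (replica_num : Int)
    (condensed_process : List (Int × Int)) : List (Int × Int) :=
  match h : (PySem.List.enumerate rest).find? (fun p => p.2.2 == replica_num) with
  | none => condensed_process
  | some (i, _) =>
      condense_delays_alt_go (PySem.List.slice rest (some (i + 1)) none) replica_num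
        (condensed_process ++
          [(((PySem.List.slice rest none (some (i + 1))).map (·.1)).foldl (· + ·) 0, replica_num)])
termination_by rest.length
decreasing_by
  have hmem := List.mem_of_find?_eq_some h
  rw [PySem.List.mem_enumerate_iff] at hmem
  obtain ⟨k, hk, hp⟩ := hmem
  have hi : i = (k : Int) := by
    have := congrArg Prod.fst hp; simpa using this
  subst hi
  have : ((k : Int) + 1) = ((k + 1 : Nat) : Int) := by push_cast; ring
  rw [this, PySem.List.slice_from_natCast]
  simp
  omega

def condense_delays_alt (arrival_process : List (Int × Int)) (replica_num : Int) : List (Int × Int) :=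
  condense_delays_alt_go arrival_process replica_num []

-- ===== PRECONDITION & SPEC =====
def Spec_condense_delays (arrival_process : List (Int × Int)) (replica_num : Int) (out : List (Int × Int)) : Prop := out = condense_delays_alt arrival_process replica_num
instance (arrival_process : List (Int × Int)) (replica_num : Int) (out : List (Int × Int)) : Decidable (Spec_condense_delays arrival_process replica_num out) := by unfold Spec_condense_delays; infer_instance

-- ===== CLAIM (what is proved, stated in full; the proofs are below) =====
def Claim_equal_condense_delays : Prop := ∀ (arrival_process : List (Int × Int)) (replica_num : Int), Dom_condense_delays arrival_process replica_num → Spec_condense_delays arrival_process replica_num (condense_delays arrival_process replica_num)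

-- ===== LEMMAS AND PROOFS =====

-- find? over enumerate with an index-blind predicate, expressed through findIdx?
lemma find?_enumerate_eq {α : Type} (q : α → Bool) :
    ∀ (xs : List α) (s : Int),
    (PySem.List.enumerate xs s).find? (fun p => q p.2) =
      (xs.findIdx? q).bind (fun k => xs[k]?.map (fun x => (s + (k : Int), x))) := by
  intro xs
  induction xs with
  | nil => intro s; simp [PySem.List.enumerate_nil]
  | cons a l ih =>
    intro s
    rw [PySem.List.enumerate_cons, List.find?_cons, List.findIdx?_cons]
    by_cases hq : q a
    · simp [hq]
    · simp only [hq, Bool.false_eq_true, if_false]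
      rw [ih (s + 1)]
      cases hfi : l.findIdx? q with
      | none => simp
      | some k =>
        simp only [Option.map_some, Option.bind_some]
        cases hg : l[k]? with
        | none => simp [hg]
        | some x =>
          simp only [Option.map_some]
          have : (a :: l)[k + 1]? = some x := by simpa using hg
          simp only [this, Option.map_some, Option.some.injEq, Prod.mk.injEq, and_true]
          omega

lemma foldl_add_init (l : List Int) (c : Int) : l.foldl (· + ·) c = c + l.foldl (· + ·) 0 := by
  induction l generalizing c with
  | nil => simp
  | cons x l ih => simp only [List.foldl_cons]; rw [ih (c + x), ih (0 + x)]; ring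

-- A's loop: pulling the accumulator list out front
lemma go_acc (xs : List (Int × Int)) (rn : Int) :
    ∀ (curr : Int) (acc : List (Int × Int)),
    condense_delays_go xs rn curr acc = acc ++ condense_delays_go xs rn curr [] := by
  induction xs with
  | nil => intro curr acc; simp [condense_delays_go]
  | cons hd tl ih =>
    intro curr acc
    obtain ⟨d, r⟩ := hd
    simp only [condense_delays_go]
    split
    · rw [ih 0 (acc ++ _), ih 0 ([] ++ _)]; simp
    · exact ih (curr + d) acc

-- A's loop characterized by the position of the first matching request
lemma go_first_match (rn : Int) :
    ∀ (xs : List (Int × Int)) (curr : Int) (acc : List (Int × Int)),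
    (match xs.findIdx? (fun p => p.2 == rn) with
     | none => condense_delays_go xs rn curr acc = acc
     | some k => condense_delays_go xs rn curr acc =
         condense_delays_go (xs.drop (k + 1)) rn 0
           (acc ++ [(curr + ((xs.take (k + 1)).map (·.1)).foldl (· + ·) 0, rn)])) := by
  intro xs
  induction xs with
  | nil => intro curr acc; simp [condense_delays_go]
  | cons hd tl ih =>
    intro curr acc
    obtain ⟨d, r⟩ := hd
    rw [List.findIdx?_cons]
    by_cases hr : (r == rn)
    · simp only [hr]
      simp only [condense_delays_go, hr, if_true]
      simp
    · simp only [hr, Bool.false_eq_true, if_false]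
      have step : condense_delays_go ((d, r) :: tl) rn curr acc =
          condense_delays_go tl rn (curr + d) acc := by
        simp [condense_delays_go, hr]
      cases hfi : tl.findIdx? (fun p => p.2 == rn) with
      | none =>
        have := ih (curr + d) acc
        rw [hfi] at this
        simp only [Option.map_none]
        rw [step]; exact this
      | some k =>
        have := ih (curr + d) acc
        rw [hfi] at this
        simp only [Option.map_some]
        rw [step, this]
        have harith : curr + ((((d, r) :: tl).take (k + 1 + 1)).map (·.1)).foldl (· + ·) 0
            = (curr + d) + ((tl.take (k + 1)).map (·.1)).foldl (· + ·) 0 := by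
          simp only [List.take_succ_cons, List.map_cons, List.foldl_cons]
          rw [foldl_add_init _ (0 + d), foldl_add_init _ 0]
          ring
        rw [List.drop_succ_cons, harith]

lemma findIdx?_lt {T : Type} (l : List T) (p : T → Bool) (k : Nat)
    (hfi : l.findIdx? p = some k) : k < l.length :=
  (List.findIdx?_eq_some_iff_findIdx_eq.mp hfi).1

-- A's loop when no request matches
lemma go_none (rn : Int) (xs : List (Int × Int)) (curr : Int) (acc : List (Int × Int))
    (hfi : xs.findIdx? (fun p => p.2 == rn) = none) :
    condense_delays_go xs rn curr acc = acc := by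
  have h := go_first_match rn xs curr acc
  rw [hfi] at h
  exact h

-- A's loop at the first matching request
lemma go_some (rn : Int) (xs : List (Int × Int)) (curr : Int) (acc : List (Int × Int)) (k : Nat)
    (hfi : xs.findIdx? (fun p => p.2 == rn) = some k) :
    condense_delays_go xs rn curr acc =
      condense_delays_go (xs.drop (k + 1)) rn 0
        (acc ++ [(curr + ((xs.take (k + 1)).map (·.1)).foldl (· + ·) 0, rn)]) := by
  have h := go_first_match rn xs curr acc
  rw [hfi] at h
  exact h

-- one unfolding of B's loop when no request matches (slices reduced to take/drop)
lemma alt_go_none (rest : List (Int × Int)) (rn : Int) (out : List (Int × Int))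
    (hfi : rest.findIdx? (fun p => p.2 == rn) = none) :
    condense_delays_alt_go rest rn out = out := by
  have hfind : (PySem.List.enumerate rest).find? (fun p => p.2.2 == rn) = none := by
    have := find?_enumerate_eq (fun y => y.2 == rn) rest 0
    simpa [hfi] using this
  rw [condense_delays_alt_go]
  split
  · rfl
  · rename_i i snd h
    rw [hfind] at h
    exact absurd h (by simp)

-- one unfolding of B's loop at the first matching request
lemma alt_go_some (rest : List (Int × Int)) (rn : Int) (out : List (Int × Int)) (k : Nat)
    (hfi : rest.findIdx? (fun p => p.2 == rn) = some k) :
    condense_delays_alt_go rest rn out =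
      condense_delays_alt_go (rest.drop (k + 1)) rn
        (out ++ [(((rest.take (k + 1)).map (·.1)).foldl (· + ·) 0, rn)]) := by
  have hk : k < rest.length := findIdx?_lt _ _ _ hfi
  have hfind : (PySem.List.enumerate rest).find? (fun p => p.2.2 == rn) =
      some ((k : Int), rest[k]) := by
    have := find?_enumerate_eq (fun y => y.2 == rn) rest 0
    simpa [hfi, List.getElem?_eq_getElem hk] using this
  rw [condense_delays_alt_go]
  split
  · rename_i h
    rw [hfind] at h
    exact absurd h (by simp)
  · rename_i i snd h
    rw [hfind] at h
    injection h with h'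
    injection h' with h1 h2
    subst h1
    have hc : ((k : Int) + 1) = ((k + 1 : Nat) : Int) := by push_cast; ring
    rw [hc, PySem.List.slice_from_natCast, PySem.List.slice_to_natCast]

-- B's loop: pulling the accumulator list out front
lemma alt_go_acc (rn : Int) :
    ∀ (n : Nat) (rest : List (Int × Int)), rest.length ≤ n → ∀ (out : List (Int × Int)),
    condense_delays_alt_go rest rn out = out ++ condense_delays_alt_go rest rn [] := by
  intro n
  induction n with
  | zero =>
    intro rest hlen out
    have : rest = [] := List.eq_nil_of_length_eq_zero (Nat.le_zero.mp hlen)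
    subst this
    rw [alt_go_none _ _ _ (by simp), alt_go_none _ _ _ (by simp)]
    simp
  | succ m ih =>
    intro rest hlen out
    cases hfi : rest.findIdx? (fun p => p.2 == rn) with
    | none => rw [alt_go_none _ _ _ hfi, alt_go_none _ _ _ hfi]; simp
    | some k =>
      have hk : k < rest.length := findIdx?_lt _ _ _ hfi
      have hdrop : (rest.drop (k + 1)).length ≤ m := by
        simp only [List.length_drop]; omega
      rw [alt_go_some _ _ _ _ hfi, alt_go_some _ _ _ _ hfi,
        ih _ hdrop (out ++ _), ih _ hdrop ([] ++ _)]
      simp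

-- main agreement, by strong induction on the length of the remaining suffix
lemma go_eq_alt_go (rn : Int) :
    ∀ (n : Nat) (xs : List (Int × Int)), xs.length ≤ n →
    condense_delays_go xs rn 0 [] = condense_delays_alt_go xs rn [] := by
  intro n
  induction n with
  | zero =>
    intro xs hlen
    have : xs = [] := List.eq_nil_of_length_eq_zero (Nat.le_zero.mp hlen)
    subst this
    rw [alt_go_none _ _ _ (by simp)]
    rfl
  | succ m ih =>
    intro xs hlen
    cases hfi : xs.findIdx? (fun p => p.2 == rn) with
    | none =>
      rw [go_none rn xs 0 [] hfi, alt_go_none _ _ _ hfi]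
    | some k =>
      have hk : k < xs.length := findIdx?_lt _ _ _ hfi
      have hdrop : (xs.drop (k + 1)).length ≤ m := by
        simp only [List.length_drop]; omega
      rw [go_some rn xs 0 [] k hfi, go_acc, alt_go_some _ _ _ _ hfi,
        alt_go_acc rn (xs.drop (k + 1)).length _ le_rfl, ih _ hdrop]
      simp

-- ===== VERDICT (by name: the statement is the Claim_ definition above) =====
theorem condense_delays_spec : Claim_equal_condense_delays := by
  intro ap rn _
  unfold Spec_condense_delays condense_delays condense_delays_alt
  exact go_eq_alt_go rn ap.length ap le_rfl
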